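-- pv_equiv track=rewrite | github.com/colaberry/WorldOfTaxonomy | world_of_taxonomy/ingest/soc2018_cascade.py | build_broad_mapping
-- ===== SOURCE A (Python) =====
-- from collections import defaultdict
-- from typing import Dict, Iterable, Mapping
--
-- def soc_broad_prefix(broad_code: str) -> str:
--     """Return the 5-char prefix that all detailed children of a broad
--     occupation share (e.g. ``11-1010`` -> ``11-101``)."""
--     return broad_code[:-1]
--
-- def build_broad_mapping(
--     broad_codes: Iterable[str],
--     detailed_descriptions: Mapping[str, str],
-- ) -> Dict[str, str]:
--     """Return ``{broad_code: description}`` for every broad that has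
--     exactly one detailed child with a populated description.
--     """
--     # Group detailed codes by their broad prefix
--     by_prefix: Dict[str, list[str]] = defaultdict(list)
--     for code, desc in detailed_descriptions.items():
--         if not desc:
--             continue
--         by_prefix[code[:-1]].append(code)
--
--     out: Dict[str, str] = {}
--     for broad in broad_codes:
--         prefix = soc_broad_prefix(broad)
--         children = by_prefix.get(prefix, [])
--         if len(children) == 1:
--             out[broad] = detailed_descriptions[children[0]]
--     return out
-- ===== SOURCE B (Python) =====
-- def build_broad_mapping(broad_codes, detailed_descriptions):
--     """Return {broad_code: description} for every broad that has
--     exactly one detailed child with a populated description.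
--     No precomputed index: scan the detailed items per broad code."""
--     out = {}
--     for broad in broad_codes:
--         prefix = broad[:-1]
--         matches = [d for c, d in detailed_descriptions.items() if c[:-1] == prefix and d]
--         if len(matches) == 1:
--             out[broad] = matches[0]
--     return out
-- ===== Notes on version B (the rewrite author's own statement) =====
-- stated objective: simpler
-- what changed: B drops A's precomputed prefix->children index (defaultdict grouping pass) and instead, for each broad code, directly scans the detailed items collecting non-empty descriptions whose key prefix matches, keeping it when exactly one is found.
import Mathlib
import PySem

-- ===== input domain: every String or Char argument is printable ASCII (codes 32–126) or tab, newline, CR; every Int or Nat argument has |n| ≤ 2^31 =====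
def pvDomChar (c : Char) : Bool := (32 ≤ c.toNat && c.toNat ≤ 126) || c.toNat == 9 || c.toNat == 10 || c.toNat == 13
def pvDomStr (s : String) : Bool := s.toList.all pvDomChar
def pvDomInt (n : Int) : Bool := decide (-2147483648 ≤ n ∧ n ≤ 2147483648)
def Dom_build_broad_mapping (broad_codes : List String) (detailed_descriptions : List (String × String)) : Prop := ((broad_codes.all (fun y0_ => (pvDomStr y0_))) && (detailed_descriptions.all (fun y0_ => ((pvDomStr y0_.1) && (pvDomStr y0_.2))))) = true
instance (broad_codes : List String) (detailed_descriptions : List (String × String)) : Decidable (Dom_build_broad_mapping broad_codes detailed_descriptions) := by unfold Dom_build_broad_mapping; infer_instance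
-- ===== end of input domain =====

-- B drops A's precomputed prefix index and instead scans the detailed items once per broad
-- code (objective: simpler — shorter, no auxiliary grouping dict; not faster).

-- ===== PORT A =====
-- helper of A: broad_code[:-1]
def soc_broad_prefix (broad_code : String) : String :=
  String.mk (PySem.List.slice broad_code.toList none (some (-1)))

def build_broad_mapping (broad_codes : List String) (detailed_descriptions : List (String × String)) : List (String × String) :=
  -- by_prefix: defaultdict(list); skip falsy (empty) descriptions
  let by_prefix : PySem.Dict String (List String) :=
    detailed_descriptions.foldl
      (fun d cd => if cd.2 = "" then d
        else d.modify (String.mk (PySem.List.slice cd.1.toList none (some (-1)))) [] (· ++ [cd.1]))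
      PySem.Dict.empty
  let out : PySem.Dict String String :=
    broad_codes.foldl
      (fun out broad =>
        match by_prefix.getD (soc_broad_prefix broad) [] with
        -- len(children) == 1: dict lookup detailed_descriptions[children[0]];
        -- the key is always present (children come from the dict's keys), so the "" default is unreachable
        | [c] => out.insert broad ((PySem.Dict.mk detailed_descriptions).getD c "")
        | _ => out)
      PySem.Dict.empty
  out.items

-- ===== PORT B =====
-- helper of B: s[:-1]
def pvPrefix (s : String) : String :=
  String.mk (PySem.List.slice s.toList none (some (-1)))

def build_broad_mapping_alt (broad_codes : List String) (detailed_descriptions : List (String × String)) : List (String × String) :=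
  (broad_codes.foldl
    (fun out broad =>
      let pref := pvPrefix broad
      let ms := detailed_descriptions.filterMap
        (fun cd => if pvPrefix cd.1 = pref ∧ cd.2 ≠ "" then some cd.2 else none)
      -- len(matches) == 1: insert matches[0] (index 0 is in range since the length is 1)
      if ms.length = 1 then out.insert broad (ms.headD "") else out)
    (PySem.Dict.empty : PySem.Dict String String)).items

-- ===== PRECONDITION & SPEC =====
-- Pre_ excludes association lists with duplicate keys: those do not represent any Python
-- dict (the Python parameter is a Mapping, whose keys are necessarily distinct).
def Pre_build_broad_mapping (broad_codes : List String) (detailed_descriptions : List (String × String)) : Prop :=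
  (detailed_descriptions.map Prod.fst).Nodup
instance (broad_codes : List String) (detailed_descriptions : List (String × String)) : Decidable (Pre_build_broad_mapping broad_codes detailed_descriptions) := by unfold Pre_build_broad_mapping; infer_instance

def pvWitness_build_broad_mapping : List String × (List (String × String)) :=
  (["11-1010"], [("11-1011", "Chief Executives")])

def Spec_build_broad_mapping (broad_codes : List String) (detailed_descriptions : List (String × String)) (out : List (String × String)) : Prop := out = build_broad_mapping_alt broad_codes detailed_descriptions
instance (broad_codes : List String) (detailed_descriptions : List (String × String)) (out : List (String × String)) : Decidable (Spec_build_broad_mapping broad_codes detailed_descriptions out) := by unfold Spec_build_broad_mapping; infer_instance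

-- ===== CLAIM (what is proved, stated in full; the proofs are below) =====
def Claim_equal_build_broad_mapping : Prop := ∀ (broad_codes : List String) (detailed_descriptions : List (String × String)), Dom_build_broad_mapping broad_codes detailed_descriptions → Pre_build_broad_mapping broad_codes detailed_descriptions → Spec_build_broad_mapping broad_codes detailed_descriptions (build_broad_mapping broad_codes detailed_descriptions)

-- ===== LEMMAS AND PROOFS =====

-- the shared filter predicate: detailed entries with prefix p and a non-empty description
def pvSel (p : String) (cd : String × String) : Bool :=
  decide (pvPrefix cd.1 = p) && decide (cd.2 ≠ "")

theorem pvPrefix_eq_soc (s : String) : pvPrefix s = soc_broad_prefix s := rfl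

-- A's index, looked up at p, lists the first components of the selected entries
theorem pvIdx_getD (dd : List (String × String)) (d0 : PySem.Dict String (List String)) (p : String) :
    (dd.foldl
      (fun d cd => if cd.2 = "" then d
        else d.modify (String.mk (PySem.List.slice cd.1.toList none (some (-1)))) [] (· ++ [cd.1]))
      d0).getD p []
    = d0.getD p [] ++ (dd.filter (pvSel p)).map Prod.fst := by
  induction dd generalizing d0 with
  | nil => simp
  | cons cd rest ih =>
    by_cases h : cd.2 = ""
    · simp [h, ih, pvSel]
    · have hkey : String.mk (PySem.List.slice cd.1.toList none (some (-1))) = pvPrefix cd.1 := rfl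
      by_cases hp : pvPrefix cd.1 = p
      · simp [h, ih, pvSel, hp, hkey, PySem.Dict.getD_modify]
      · simp only [List.foldl_cons, if_neg h, hkey, ih]
        rw [PySem.Dict.getD_modify]
        have : pvSel p cd = false := by simp [pvSel]; tauto
        simp [this, if_neg (fun h' : p = pvPrefix cd.1 => hp h'.symm)]

-- B's comprehension lists the second components of the selected entries
theorem pvMatches_eq (dd : List (String × String)) (p : String) :
    dd.filterMap (fun cd => if pvPrefix cd.1 = p ∧ cd.2 ≠ "" then some cd.2 else none)
    = (dd.filter (pvSel p)).map Prod.snd := by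
  induction dd with
  | nil => rfl
  | cons cd rest ih =>
    by_cases h : pvPrefix cd.1 = p ∧ cd.2 ≠ ""
    · simp [List.filterMap_cons, h, pvSel, h.1, h.2, ih]
    · have : pvSel p cd = false := by simp [pvSel]; tauto
      simp [List.filterMap_cons, h, this, ih]

-- the A-side dict lookup of a selected entry's key returns its description
theorem pv_lookup (dd : List (String × String)) (hnd : (dd.map Prod.fst).Nodup)
    (c dsc : String) (hmem : (c, dsc) ∈ dd) :
    (PySem.Dict.mk dd).getD c "" = dsc := by
  apply PySem.Dict.getD_of_mem_items (d := PySem.Dict.mk dd) hmem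
  simpa [PySem.Dict.keys] using hnd

theorem pvStep_eq (dd : List (String × String)) (hnd : (dd.map Prod.fst).Nodup)
    (out : PySem.Dict String String) (broad : String) :
    (match ((dd.foldl
        (fun d cd => if cd.2 = "" then d
          else d.modify (String.mk (PySem.List.slice cd.1.toList none (some (-1)))) [] (· ++ [cd.1]))
        PySem.Dict.empty).getD (soc_broad_prefix broad) []) with
      | [c] => out.insert broad ((PySem.Dict.mk dd).getD c "")
      | _ => out)
    = (let ms := dd.filterMap
          (fun cd => if pvPrefix cd.1 = pvPrefix broad ∧ cd.2 ≠ "" then some cd.2 else none)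
        if ms.length = 1 then out.insert broad (ms.headD "") else out) := by
  rw [pvIdx_getD, pvMatches_eq, ← pvPrefix_eq_soc]
  rcases hfl : dd.filter (pvSel (pvPrefix broad)) with _ | ⟨⟨c, dsc⟩, tl⟩
  · rfl
  · rcases tl with _ | ⟨cd2, tl2⟩
    · have hf : (c, dsc) ∈ dd.filter (pvSel (pvPrefix broad)) := by
        rw [hfl]; exact List.mem_singleton_self _
      have hmem : (c, dsc) ∈ dd := List.mem_of_mem_filter hf
      simp [pv_lookup dd hnd c dsc hmem]
    · rfl

theorem pvFoldl_eq (dd : List (String × String)) (hnd : (dd.map Prod.fst).Nodup)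
    (bs : List String) (acc : PySem.Dict String String) :
    bs.foldl
      (fun out broad =>
        match ((dd.foldl
            (fun d cd => if cd.2 = "" then d
              else d.modify (String.mk (PySem.List.slice cd.1.toList none (some (-1)))) [] (· ++ [cd.1]))
            PySem.Dict.empty).getD (soc_broad_prefix broad) []) with
          | [c] => out.insert broad ((PySem.Dict.mk dd).getD c "")
          | _ => out) acc
    = bs.foldl
        (fun out broad =>
          let ms := dd.filterMap
              (fun cd => if pvPrefix cd.1 = pvPrefix broad ∧ cd.2 ≠ "" then some cd.2 else none)
          if ms.length = 1 then out.insert broad (ms.headD "") else out) acc := by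
  induction bs generalizing acc with
  | nil => rfl
  | cons b rest ih => simp only [List.foldl_cons]; rw [pvStep_eq dd hnd]; exact ih _

-- ===== VERDICT (by name: the statement is the Claim_ definition above) =====
theorem build_broad_mapping_spec : Claim_equal_build_broad_mapping := by
  intro bs dd _ hnd
  unfold Spec_build_broad_mapping build_broad_mapping build_broad_mapping_alt
  exact congrArg PySem.Dict.items (pvFoldl_eq dd hnd bs PySem.Dict.empty)
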